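-- pv_equiv track=rewrite | github.com/Aayush206a/Python-Cryptography | lab8AayushBhattarai.py | mitm_attack
-- ===== SOURCE A (Python) =====
-- def simple_encrypt(data, key):
--     """Simple XOR-based encryption (16-bit)"""
--     return data ^ key
--
-- def mitm_attack(plaintext, ciphertext, key_space=256):
--     forward = {}
--
--     # Phase 1: Encrypt plaintext with all k1
--     for k1 in range(key_space):
--         mid = simple_encrypt(plaintext, k1)
--         forward[mid] = k1
--
--     # Phase 2: Decrypt ciphertext with all k2
--     matches = []
--     for k2 in range(key_space):
--         mid = simple_encrypt(ciphertext, k2)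
--         if mid in forward:
--             matches.append((forward[mid], k2))
--
--     return matches
-- ===== SOURCE B (Python) =====
-- def mitm_attack(plaintext, ciphertext, key_space=256):
--     # Closed-form inverse: k1 must equal (plaintext ^ ciphertext) ^ k2.
--     delta = plaintext ^ ciphertext
--     matches = []
--     for k2 in range(key_space):
--         k1 = delta ^ k2
--         if 0 <= k1 < key_space:
--             matches.append((k1, k2))
--     return matches
-- ===== Notes on version B (the rewrite author's own statement) =====
-- stated objective: simpler
-- what changed: Drops phase 1 entirely: instead of building a forward dict of all plaintext^k1 and looking each ciphertext^k2 up in it, B computes delta = plaintext^ciphertext once and recovers k1 = delta^k2 in closed form with a range check, in a single pass with no table.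
import Mathlib
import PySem

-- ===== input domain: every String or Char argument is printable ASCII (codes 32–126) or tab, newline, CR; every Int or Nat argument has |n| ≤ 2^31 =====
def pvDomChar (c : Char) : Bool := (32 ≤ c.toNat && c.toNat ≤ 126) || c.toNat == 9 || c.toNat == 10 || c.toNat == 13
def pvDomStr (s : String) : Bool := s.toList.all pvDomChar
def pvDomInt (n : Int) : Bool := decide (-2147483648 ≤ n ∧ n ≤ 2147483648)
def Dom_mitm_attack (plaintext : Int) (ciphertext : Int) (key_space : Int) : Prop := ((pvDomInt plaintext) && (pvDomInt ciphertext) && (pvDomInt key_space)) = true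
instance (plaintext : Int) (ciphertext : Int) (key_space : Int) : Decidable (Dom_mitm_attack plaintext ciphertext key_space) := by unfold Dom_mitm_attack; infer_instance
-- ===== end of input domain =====

-- ===== PORT A =====
-- B replaces A's forward dict + lookup pass by the closed-form inverse k1 = plaintext^ciphertext^k2
-- in one pass with no table (simpler: phase 1 disappears); return values proved equal everywhere.
-- def simple_encrypt(data, key): return data ^ key
def simple_encrypt (data : Int) (key : Int) : Int := PySem.Int.bxor data key

def mitm_attack (plaintext : Int) (ciphertext : Int) (key_space : Int) : List (Int × Int) :=
  -- Phase 1: forward[plaintext ^ k1] = k1 for k1 in range(key_space)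
  let forward : PySem.Dict Int Int :=
    (PySem.List.pyRange 0 key_space 1).foldl
      (fun d k1 => d.insert (simple_encrypt plaintext k1) k1) PySem.Dict.empty
  -- Phase 2: for k2 in range(key_space): mid = ciphertext ^ k2; if mid in forward: append
  (PySem.List.pyRange 0 key_space 1).foldl
    (fun ms k2 =>
      let mid := simple_encrypt ciphertext k2
      if forward.contains mid then
        ms ++ [((forward.get? mid).getD 0, k2)]   -- get? is some under the contains guard; getD 0 only totalizes
      else ms) []

-- ===== PORT B =====
def mitm_attack_alt (plaintext : Int) (ciphertext : Int) (key_space : Int) : List (Int × Int) :=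
  let delta := PySem.Int.bxor plaintext ciphertext
  (PySem.List.pyRange 0 key_space 1).foldl
    (fun ms k2 =>
      let k1 := PySem.Int.bxor delta k2
      if 0 ≤ k1 ∧ k1 < key_space then ms ++ [(k1, k2)] else ms) []

-- ===== PRECONDITION & SPEC =====
def Spec_mitm_attack (plaintext : Int) (ciphertext : Int) (key_space : Int) (out : List (Int × Int)) : Prop := out = mitm_attack_alt plaintext ciphertext key_space
instance (plaintext : Int) (ciphertext : Int) (key_space : Int) (out : List (Int × Int)) : Decidable (Spec_mitm_attack plaintext ciphertext key_space out) := by unfold Spec_mitm_attack; infer_instance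

-- ===== CLAIM (what is proved, stated in full; the proofs are below) =====
def Claim_equal_mitm_attack : Prop := ∀ (plaintext : Int) (ciphertext : Int) (key_space : Int), Dom_mitm_attack plaintext ciphertext key_space → Spec_mitm_attack plaintext ciphertext key_space (mitm_attack plaintext ciphertext key_space)

-- ===== LEMMAS AND PROOFS =====
theorem pv_bxor_eq_xor (a b : Int) : PySem.Int.bxor a b = Int.xor a b := by
  cases a <;> cases b <;>
    simp [PySem.Int.bxor, Int.xor, Int.negSucc_eq] <;> omega

theorem pv_bxor_cancel_left (a b : Int) :
    PySem.Int.bxor a (PySem.Int.bxor a b) = b := by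
  unfold PySem.Int.bxor
  split_ifs <;> simp_all [Int.toNat_natCast, Nat.xor_xor_cancel_left] <;> omega

theorem pv_bxor_assoc (a b c : Int) :
    PySem.Int.bxor a (PySem.Int.bxor b c) = PySem.Int.bxor (PySem.Int.bxor a b) c := by
  simp only [pv_bxor_eq_xor]
  cases a <;> cases b <;> cases c <;> simp [Int.xor, Nat.xor_assoc]

-- characterisation of A's phase-1 dict
theorem pv_forward_get? (p m : Int) (n : Nat) :
    ((PySem.List.pyRange 0 (n : Int) 1).foldl
        (fun d k1 => d.insert (PySem.Int.bxor p k1) k1) PySem.Dict.empty).get? m =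
      if 0 ≤ PySem.Int.bxor p m ∧ PySem.Int.bxor p m < (n : Int) then
        some (PySem.Int.bxor p m)
      else none := by
  induction n with
  | zero => simp [PySem.List.pyRange_one_eq_nil (by omega : (0:Int) ≤ 0)]
  | succ k ih =>
    have hsplit : PySem.List.pyRange 0 ((k + 1 : Nat) : Int) 1 =
        PySem.List.pyRange 0 (k : Int) 1 ++ [(k : Int)] := by
      push_cast
      exact PySem.List.pyRange_one_succ_right (a := 0) (b := (k : Int)) (by positivity)
    rw [hsplit, List.foldl_append]
    simp only [List.foldl_cons, List.foldl_nil]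
    rw [PySem.Dict.get?_insert]
    by_cases hm : m = PySem.Int.bxor p (k : Int)
    · subst hm
      rw [if_pos rfl, pv_bxor_cancel_left]
      rw [if_pos ⟨Int.natCast_nonneg k, by push_cast; omega⟩]
    · rw [if_neg hm, ih]
      have hk : PySem.Int.bxor p m ≠ (k : Int) := fun h =>
        hm (by rw [← h, pv_bxor_cancel_left])
      split_ifs with h1 h2 <;> first | rfl | (exfalso; push_cast at *; omega)

-- A = B for every key_space
theorem pv_main (p c ks : Int) : mitm_attack p c ks = mitm_attack_alt p c ks := by
  simp only [mitm_attack, mitm_attack_alt, simple_encrypt]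
  by_cases hks : ks ≤ 0
  · rw [PySem.List.pyRange_one_eq_nil hks]; rfl
  · obtain ⟨n, rfl⟩ : ∃ n : Nat, ks = (n : Int) := ⟨ks.toNat, (Int.toNat_of_nonneg (by omega)).symm⟩
    have hf : (fun (ms : List (Int × Int)) (k2 : Int) =>
        if ((PySem.List.pyRange 0 (n : Int) 1).foldl
              (fun d k1 => d.insert (PySem.Int.bxor p k1) k1) PySem.Dict.empty).contains
            (PySem.Int.bxor c k2) then
          ms ++ [((((PySem.List.pyRange 0 (n : Int) 1).foldl
              (fun d k1 => d.insert (PySem.Int.bxor p k1) k1) PySem.Dict.empty).get?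
            (PySem.Int.bxor c k2)).getD 0, k2)]
        else ms) =
        (fun (ms : List (Int × Int)) (k2 : Int) =>
          if 0 ≤ PySem.Int.bxor (PySem.Int.bxor p c) k2 ∧
              PySem.Int.bxor (PySem.Int.bxor p c) k2 < (n : Int) then
            ms ++ [(PySem.Int.bxor (PySem.Int.bxor p c) k2, k2)]
          else ms) := by
      funext ms k2
      rw [PySem.Dict.contains_eq_isSome_get?, pv_forward_get?, pv_bxor_assoc p c k2]
      by_cases h : 0 ≤ PySem.Int.bxor (PySem.Int.bxor p c) k2 ∧
          PySem.Int.bxor (PySem.Int.bxor p c) k2 < (n : Int)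
      · simp [h]
      · simp [h]
    rw [hf]

-- ===== VERDICT (by name: the statement is the Claim_ definition above) =====
theorem mitm_attack_spec : Claim_equal_mitm_attack := by
  intro p c ks _
  unfold Spec_mitm_attack
  exact pv_main p c ks
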